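-- pv_equiv track=rewrite | github.com/xiaoxue11/hank_practice | Search/05_triplets.py | triplets2
-- ===== SOURCE A (Python) =====
-- def triplets2(a, b, c):
--     count = 0
--     new_a = sorted(set(a))
--     new_b = sorted(set(b))
--     new_c = sorted(set(c))
--     for b_v in new_b:
--         a_count = 0
--         c_count = 0
--         for a_v in new_a:
--             if a_v <= b_v:
--                 a_count += 1
--         for c_v in new_c:
--             if c_v <= b_v:
--                 c_count += 1
--         count += a_count * c_count
--     return count
-- ===== SOURCE B (Python) =====
-- def triplets2(a, b, c):
--     sa = sorted(set(a))
--     sb = sorted(set(b))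
--     sc = sorted(set(c))
--     total = 0
--     i = j = 0
--     la, lc = len(sa), len(sc)
--     for v in sb:
--         while i < la and sa[i] <= v:
--             i += 1
--         while j < lc and sc[j] <= v:
--             j += 1
--         total += i * j
--     return total
-- ===== Notes on version B (the rewrite author's own statement) =====
-- stated objective: faster
-- what changed: Replaces the per-b rescans of the whole a and c lists with monotone two-pointer sweeps over the sorted deduplicated lists, so each element of a and c is visited once across all b values.
import Mathlib
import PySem

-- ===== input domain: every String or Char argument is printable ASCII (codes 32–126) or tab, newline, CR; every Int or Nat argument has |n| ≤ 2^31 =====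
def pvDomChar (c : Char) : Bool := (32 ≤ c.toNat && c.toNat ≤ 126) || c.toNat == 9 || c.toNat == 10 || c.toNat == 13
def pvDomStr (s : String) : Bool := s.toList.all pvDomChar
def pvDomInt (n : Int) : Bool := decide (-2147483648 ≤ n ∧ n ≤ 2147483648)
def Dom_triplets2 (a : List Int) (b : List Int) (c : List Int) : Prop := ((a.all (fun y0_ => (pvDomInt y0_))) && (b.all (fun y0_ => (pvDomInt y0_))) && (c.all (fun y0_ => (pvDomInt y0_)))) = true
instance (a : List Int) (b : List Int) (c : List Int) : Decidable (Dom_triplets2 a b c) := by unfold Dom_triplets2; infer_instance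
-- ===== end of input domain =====

-- B replaces A's per-b rescans of a and c with monotone two-pointer sweeps over the
-- sorted deduplicated lists (objective: faster, asymptotically).

-- ===== PORT A =====
def triplets2 (a : List Int) (b : List Int) (c : List Int) : Int :=
  let new_a := PySem.List.sorted (PySem.Set.ofList a) (fun x => x) false
  let new_b := PySem.List.sorted (PySem.Set.ofList b) (fun x => x) false
  let new_c := PySem.List.sorted (PySem.Set.ofList c) (fun x => x) false
  new_b.foldl (fun count b_v =>
    let a_count : Int := new_a.foldl (fun n a_v => if a_v ≤ b_v then n + 1 else n) 0
    let c_count : Int := new_c.foldl (fun n c_v => if c_v ≤ b_v then n + 1 else n) 0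
    count + a_count * c_count) 0

-- ===== PORT B =====
-- the inner 'while i < len and s[i] <= v: i += 1' of Source B, as recursion on the
-- suffix s.drop i with the counter i carried along
def pvAdvance (v : Int) : List Int → Nat → List Int × Nat
  | [], n => ([], n)
  | x :: xs, n => if x ≤ v then pvAdvance v xs (n + 1) else (x :: xs, n)

-- the 'for v in sb' loop of Source B with state (remaining sa, i, remaining sc, j, total)
def pvBLoop : List Int → List Int → Nat → List Int → Nat → Int → Int
  | [], _, _, _, _, t => t
  | v :: bs, ra, na, rc, nc, t =>
    let p := pvAdvance v ra na
    let q := pvAdvance v rc nc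
    pvBLoop bs p.1 p.2 q.1 q.2 (t + (p.2 : Int) * (q.2 : Int))

def triplets2_alt (a : List Int) (b : List Int) (c : List Int) : Int :=
  let sa := PySem.List.sorted (PySem.Set.ofList a) (fun x => x) false
  let sb := PySem.List.sorted (PySem.Set.ofList b) (fun x => x) false
  let sc := PySem.List.sorted (PySem.Set.ofList c) (fun x => x) false
  pvBLoop sb sa 0 sc 0 0

-- ===== PRECONDITION & SPEC =====
def Spec_triplets2 (a : List Int) (b : List Int) (c : List Int) (out : Int) : Prop := out = triplets2_alt a b c
instance (a : List Int) (b : List Int) (c : List Int) (out : Int) : Decidable (Spec_triplets2 a b c out) := by unfold Spec_triplets2; infer_instance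

-- ===== CLAIM (what is proved, stated in full; the proofs are below) =====
def Claim_equal_triplets2 : Prop := ∀ (a : List Int) (b : List Int) (c : List Int), Dom_triplets2 a b c → Spec_triplets2 a b c (triplets2 a b c)

-- ===== LEMMAS AND PROOFS =====

-- A's inner counting loop is countP
theorem countLe_fold (v : Int) : ∀ (s : List Int) (n : Int),
    s.foldl (fun n x => if x ≤ v then n + 1 else n) n
      = n + (s.countP (fun x => decide (x ≤ v)) : Int) := by
  intro s
  induction s with
  | nil => intro n; simp
  | cons x xs ih =>
    intro n
    by_cases h : x ≤ v <;> simp [List.foldl, h, ih] <;> ring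

-- pvAdvance extends the processed prefix exactly to all elements ≤ v
theorem pvAdvance_spec (v : Int) : ∀ (rest done : List Int),
    (done ++ rest).Pairwise (· ≤ ·) → (∀ x ∈ done, x ≤ v) →
    ∃ done', done' ++ (pvAdvance v rest done.length).1 = done ++ rest ∧
      (pvAdvance v rest done.length).2 = done'.length ∧
      (∀ x ∈ done', x ≤ v) ∧
      (∀ x ∈ (pvAdvance v rest done.length).1, ¬ x ≤ v) := by
  intro rest
  induction rest with
  | nil =>
    intro done hp hd
    exact ⟨done, by simp [pvAdvance], by simp [pvAdvance], hd, by simp [pvAdvance]⟩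
  | cons x xs ih =>
    intro done hp hd
    by_cases hx : x ≤ v
    · have hp' : ((done ++ [x]) ++ xs).Pairwise (· ≤ ·) := by
        simpa [List.append_assoc] using hp
      have hd' : ∀ y ∈ done ++ [x], y ≤ v := by
        intro y hy
        rcases List.mem_append.1 hy with h | h
        · exact hd y h
        · simp at h; subst h; exact hx
      obtain ⟨d', h1, h2, h3, h4⟩ := ih (done ++ [x]) hp' hd'
      rw [List.length_append, List.length_singleton] at h1 h2 h4
      have hadv : pvAdvance v (x :: xs) done.length = pvAdvance v xs (done.length + 1) := by
        simp [pvAdvance, hx]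
      refine ⟨d', ?_, ?_, h3, ?_⟩
      · rw [hadv, h1]; simp
      · rw [hadv, h2]
      · rw [hadv]; exact h4
    · refine ⟨done, by simp [pvAdvance, hx], by simp [pvAdvance, hx], hd, ?_⟩
      intro y hy
      simp only [pvAdvance, if_neg hx] at hy
      rcases List.mem_cons.1 hy with h | h
      · subst h; exact hx
      · have hxy : x ≤ y := by
          have := (List.pairwise_append.1 hp).2.1
          exact (List.pairwise_cons.1 this).1 y h
        intro hyv; exact hx (le_trans hxy hyv)

-- a list split into a ≤v prefix and a >v suffix has countP (≤v) = prefix length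
theorem countP_split (v : Int) (d r : List Int)
    (hd : ∀ x ∈ d, x ≤ v) (hr : ∀ x ∈ r, ¬ x ≤ v) :
    (d ++ r).countP (fun x => decide (x ≤ v)) = d.length := by
  rw [List.countP_append]
  have h1 : d.countP (fun x => decide (x ≤ v)) = d.length :=
    List.countP_eq_length.2 (fun x hx => by simpa using hd x hx)
  have h2 : r.countP (fun x => decide (x ≤ v)) = 0 :=
    List.countP_eq_zero.2 (fun x hx => by simpa using hr x hx)
  omega

-- the two-pointer loop computes the same sum as A's per-b counts
theorem pvBLoop_eq (sa sc : List Int)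
    (hsa : sa.Pairwise (· ≤ ·)) (hsc : sc.Pairwise (· ≤ ·)) :
    ∀ (bs : List Int), bs.Pairwise (· ≤ ·) →
    ∀ (da dc ra rc : List Int) (t : Int),
      da ++ ra = sa → dc ++ rc = sc →
      (∀ v ∈ bs, ∀ x ∈ da, x ≤ v) → (∀ v ∈ bs, ∀ x ∈ dc, x ≤ v) →
      pvBLoop bs ra da.length rc dc.length t
        = bs.foldl (fun acc v =>
            acc + (sa.countP (fun x => decide (x ≤ v)) : Int)
                * (sc.countP (fun x => decide (x ≤ v)) : Int)) t := by
  intro bs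
  induction bs with
  | nil => intro _ da dc ra rc t _ _ _ _; simp [pvBLoop]
  | cons v bs' ih =>
    intro hbp da dc ra rc t hra hrc hda hdc
    have hpa : (da ++ ra).Pairwise (· ≤ ·) := hra ▸ hsa
    have hpc : (dc ++ rc).Pairwise (· ≤ ·) := hrc ▸ hsc
    obtain ⟨da', ha1, ha2, ha3, ha4⟩ :=
      pvAdvance_spec v ra da hpa (hda v (by simp))
    obtain ⟨dc', hc1, hc2, hc3, hc4⟩ :=
      pvAdvance_spec v rc dc hpc (hdc v (by simp))
    have hv : ∀ v' ∈ bs', v ≤ v' := (List.pairwise_cons.1 hbp).1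
    have hcnta : sa.countP (fun x => decide (x ≤ v)) = da'.length := by
      rw [← hra, ← ha1]; exact countP_split v da' _ ha3 ha4
    have hcntc : sc.countP (fun x => decide (x ≤ v)) = dc'.length := by
      rw [← hrc, ← hc1]; exact countP_split v dc' _ hc3 hc4
    have step := ih (List.pairwise_cons.1 hbp).2 da' dc'
      (pvAdvance v ra da.length).1 (pvAdvance v rc dc.length).1
      (t + ((pvAdvance v ra da.length).2 : Int) * ((pvAdvance v rc dc.length).2 : Int))
      (by rw [ha1, hra]) (by rw [hc1, hrc])
      (fun v' hv' x hx => le_trans (ha3 x hx) (hv v' hv'))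
      (fun v' hv' x hx => le_trans (hc3 x hx) (hv v' hv'))
    simp only [pvBLoop, List.foldl_cons]
    rw [ha2, hc2, hcnta, hcntc]
    rw [ha2, hc2] at step
    exact step

theorem pvMain (sa sb sc : List Int) (hsa : sa.Pairwise (· ≤ ·))
    (hsb : sb.Pairwise (· ≤ ·)) (hsc : sc.Pairwise (· ≤ ·)) :
    sb.foldl (fun count b_v =>
      count + (sa.foldl (fun n a_v => if a_v ≤ b_v then n + 1 else n) (0 : Int))
            * (sc.foldl (fun n c_v => if c_v ≤ b_v then n + 1 else n) (0 : Int))) 0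
    = pvBLoop sb sa 0 sc 0 0 := by
  have h := pvBLoop_eq sa sc hsa hsc sb hsb [] [] sa sc 0 rfl rfl
    (by simp) (by simp)
  simp only [List.length_nil] at h
  have hf : (fun (count b_v : Int) =>
      count + (sa.foldl (fun n a_v => if a_v ≤ b_v then n + 1 else n) (0 : Int))
            * (sc.foldl (fun n c_v => if c_v ≤ b_v then n + 1 else n) (0 : Int)))
      = (fun (count b_v : Int) =>
      count + (sa.countP (fun x => decide (x ≤ b_v)) : Int)
            * (sc.countP (fun x => decide (x ≤ b_v)) : Int)) := by
    funext count b_v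
    rw [countLe_fold, countLe_fold]
    ring
  rw [hf, h]

theorem triplets2_eq_alt (a b c : List Int) : triplets2 a b c = triplets2_alt a b c :=
  pvMain _ _ _
    ((PySem.List.sorted_ofList_pairwise_lt (xs := a)).imp (fun h => le_of_lt h))
    ((PySem.List.sorted_ofList_pairwise_lt (xs := b)).imp (fun h => le_of_lt h))
    ((PySem.List.sorted_ofList_pairwise_lt (xs := c)).imp (fun h => le_of_lt h))

-- ===== VERDICT (by name: the statement is the Claim_ definition above) =====
theorem triplets2_spec : Claim_equal_triplets2 := by
  intro a b c _
  unfold Spec_triplets2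
  exact triplets2_eq_alt a b c
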